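-- pv_equiv track=rewrite | github.com/nrhawkins/qnano | src/python/qnano/goog/cellCompete.py | cellCompete
-- ===== SOURCE A (Python) =====
-- def cellCompete(states, days):
--
--     if days == 0:
--         return states
--     if len(states) < 1:
--         return states
--     new_states = states.copy()
--
--     for d in range(1, days+1):
--         states = new_states.copy()
--         for i in range(0, len(states)):
--             left = states[i-1] if i > 0 else 0
--             right = states[i+1] if i < len(states) - 1 else 0
--             if left == right:
--                 new_states[i] = 0
--             else:
--                 new_states[i] = 1
--
--     return new_states
-- ===== SOURCE B (Python) =====
-- def cellCompete(states, days):
--     # Bit-parallel re-implementation: after the first (equality-based) day the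
--     # state is 0/1, so the whole row is packed into one integer and each later
--     # day is a constant number of word-level shift/xor operations.
--     n = len(states)
--     if days <= 0 or n == 0:
--         return list(states)
--     cur = [1 if (states[i - 1] if i > 0 else 0) != (states[i + 1] if i + 1 < n else 0) else 0
--            for i in range(n)]
--     x = 0
--     for i, v in enumerate(cur):
--         x |= v << i
--     mask = (1 << n) - 1
--     for _ in range(days - 1):
--         x = ((x >> 1) ^ (x << 1)) & mask
--     return [(x >> i) & 1 for i in range(n)]
-- ===== Notes on version B (the rewrite author's own statement) =====
-- stated objective: faster
-- what changed: Instead of copying the whole list and rewriting every cell with Python-level indexing each day, B does the first (equality-based) day once, packs the 0/1 row into a single integer bitmask, and advances each remaining day with word-parallel shift/xor/mask operations on that integer.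
import Mathlib
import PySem

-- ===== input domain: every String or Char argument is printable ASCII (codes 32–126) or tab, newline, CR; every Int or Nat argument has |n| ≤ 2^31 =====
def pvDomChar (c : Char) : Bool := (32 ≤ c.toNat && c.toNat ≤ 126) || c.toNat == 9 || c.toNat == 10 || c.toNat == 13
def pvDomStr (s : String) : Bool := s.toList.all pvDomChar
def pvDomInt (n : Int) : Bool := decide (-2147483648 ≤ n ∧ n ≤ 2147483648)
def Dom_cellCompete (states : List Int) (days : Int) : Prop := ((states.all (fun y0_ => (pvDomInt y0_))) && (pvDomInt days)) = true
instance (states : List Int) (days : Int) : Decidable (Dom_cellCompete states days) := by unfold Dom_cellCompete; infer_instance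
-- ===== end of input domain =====

-- B replaces the per-cell Python loop by a packed-integer bitmask whose daily
-- update is shift/xor/mask word operations (measurably faster; same values).

-- ===== PORT A =====
def cellCompete (states : List Int) (days : Int) : List Int :=
  if days = 0 then states
  else if states.length < 1 then states
  else
    (PySem.List.pyRange 1 (days + 1) 1).foldl
      (fun new _d =>
        let st := new
        (PySem.List.pyRange 0 (st.length : Int) 1).foldl
          (fun acc i =>
            let left := if i > 0 then PySem.List.pyGetD st (i - 1) 0 else 0
            let right := if i < (st.length : Int) - 1 then PySem.List.pyGetD st (i + 1) 0 else 0
            PySem.List.pySetD acc i (if left = right then 0 else 1))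
          new)
      states

-- ===== PORT B =====
-- the per-day bitmask loop of Source B: x = ((x >> 1) ^ (x << 1)) & mask, `k` times
def pvBitSteps : Nat → Nat → Nat → Nat
  | 0, _, x => x
  | k + 1, mask, x => pvBitSteps k mask (((x >>> 1) ^^^ (x <<< 1)) &&& mask)

def cellCompete_alt (states : List Int) (days : Int) : List Int :=
  let n := states.length
  if days ≤ 0 ∨ n = 0 then states
  else
    let cur := (List.range n).map (fun i =>
      if (if i > 0 then states.getD (i - 1) 0 else 0)
          ≠ (if i + 1 < n then states.getD (i + 1) 0 else 0)
      then (1 : Int) else 0)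
    let x := cur.zipIdx.foldl (fun x vi => x ||| (vi.1.toNat <<< vi.2)) 0
    let mask := (1 <<< n) - 1
    let y := pvBitSteps (days - 1).toNat mask x
    (List.range n).map (fun i => ((y >>> i) &&& 1 : Nat))

-- ===== PRECONDITION & SPEC =====
def Spec_cellCompete (states : List Int) (days : Int) (out : List Int) : Prop := out = cellCompete_alt states days
instance (states : List Int) (days : Int) (out : List Int) : Decidable (Spec_cellCompete states days out) := by unfold Spec_cellCompete; infer_instance

-- ===== CLAIM (what is proved, stated in full; the proofs are below) =====
def Claim_equal_cellCompete : Prop := ∀ (states : List Int) (days : Int), Dom_cellCompete states days → Spec_cellCompete states days (cellCompete states days)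

-- ===== LEMMAS AND PROOFS =====


lemma take_succ_set {α : Type} (l : List α) (k : Nat) (hk : k < l.length) (v : α) :
    (l.set k v).take (k + 1) = l.take k ++ [v] := by
  apply List.ext_getElem
  · simp; omega
  · intro i h1 h2
    simp only [List.getElem_take, List.getElem_set]
    rcases Nat.lt_or_ge i k with h | h
    · rw [List.getElem_append_left (by simp; omega)]
      simp only [List.getElem_take]
      split
      · omega
      · rfl
    · have : i = k := by simp at h1; omega
      subst this
      simp

def stepL (xs : List Int) : List Int :=
  (List.range xs.length).map (fun i =>
    if (if 0 < i then xs.getD (i - 1) 0 else 0)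
        = (if i + 1 < xs.length then xs.getD (i + 1) 0 else 0)
    then (0 : Int) else 1)

lemma stepL_getElem (xs : List Int) (k : Nat) (hk : k < xs.length) :
    (stepL xs)[k]'(by simp [stepL]; omega) =
      if (if 0 < k then xs.getD (k - 1) 0 else 0)
          = (if k + 1 < xs.length then xs.getD (k + 1) 0 else 0)
      then (0 : Int) else 1 := by
  simp [stepL]

lemma innerA (st : List Int) (k : Nat) (acc : List Int)
    (hlen : acc.length = st.length) (hk : k ≤ st.length) :
    (PySem.List.pyRange (k : Int) (st.length : Int) 1).foldl
      (fun acc i =>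
        PySem.List.pySetD acc i
          (if (if i > 0 then PySem.List.pyGetD st (i - 1) 0 else 0)
              = (if i < (st.length : Int) - 1 then PySem.List.pyGetD st (i + 1) 0 else 0)
           then (0 : Int) else 1))
      acc
    = acc.take k ++ (stepL st).drop k := by
  have hsl : (stepL st).length = st.length := by simp [stepL]
  induction hm : st.length - k generalizing k acc with
  | zero =>
      have hk' : k = st.length := by omega
      rw [PySem.List.pyRange_one_eq_nil (by exact_mod_cast hk'.ge)]
      rw [List.take_of_length_le (by omega), List.drop_of_length_le (by omega), List.append_nil]
      rfl
  | succ m ih =>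
      have hklt : k < st.length := by omega
      rw [PySem.List.pyRange_one_cons (by exact_mod_cast hklt)]
      rw [List.foldl_cons]
      have hL : (if (k : Int) > 0 then PySem.List.pyGetD st ((k : Int) - 1) 0 else 0)
          = (if 0 < k then st.getD (k - 1) 0 else 0) := by
        by_cases h0 : 0 < k
        · rw [if_pos (by exact_mod_cast h0), if_pos h0,
            show (k : Int) - 1 = ((k - 1 : Nat) : Int) by omega, PySem.List.pyGetD_natCast]
        · rw [if_neg (by omega), if_neg h0]
      have hR : (if (k : Int) < (st.length : Int) - 1 then PySem.List.pyGetD st ((k : Int) + 1) 0 else 0)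
          = (if k + 1 < st.length then st.getD (k + 1) 0 else 0) := by
        by_cases h2 : k + 1 < st.length
        · rw [if_pos (by omega), if_pos h2,
            show (k : Int) + 1 = ((k + 1 : Nat) : Int) by omega, PySem.List.pyGetD_natCast]
        · rw [if_neg (by omega), if_neg h2]
      rw [hL, hR, PySem.List.pySetD_natCast]
      rw [show (k : Int) + 1 = ((k + 1 : Nat) : Int) by omega]
      rw [ih (k + 1) _ (by simp [hlen]) (by omega) (by omega)]
      rw [take_succ_set _ _ (by omega) _]
      rw [List.drop_eq_getElem_cons (by omega : k < (stepL st).length)]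
      rw [stepL_getElem st k hklt]
      simp

lemma testBit_one' (m : Nat) : Nat.testBit 1 m = decide (m = 0) := by
  cases m with
  | zero => decide
  | succ m => simp [Nat.testBit_succ]

lemma enc_testBit (bs : List Int) (hb : ∀ v ∈ bs, v = 0 ∨ v = 1) (a k j : Nat) :
    Nat.testBit ((bs.zipIdx k).foldl (fun x vi => x ||| (vi.1.toNat <<< vi.2)) a) j
      = (a.testBit j || (decide (k ≤ j) && decide (j - k < bs.length) && (bs.getD (j - k) 0 == 1))) := by
  induction bs generalizing a k with
  | nil => simp
  | cons v bs ih =>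
      rw [List.zipIdx_cons, List.foldl_cons]
      rw [ih (fun w hw => hb w (List.mem_cons_of_mem _ hw)) _ (k + 1)]
      have hv := hb v (List.mem_cons_self ..)
      have hvt : Nat.testBit v.toNat = fun m => ((v == 1) && decide (m = 0)) := by
        funext m
        rcases hv with h | h <;> subst h <;> simp [testBit_one']
      rw [Nat.testBit_or, Nat.testBit_shiftLeft, hvt]
      rcases Nat.lt_trichotomy j k with h | h | h
      · have e1 : ¬ (k ≤ j) := by omega
        have e2 : ¬ (k + 1 ≤ j) := by omega
        simp [e1, e2]
      · subst h
        simp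
      · have e0 : j ≥ k := by omega
        have e1 : k + 1 ≤ j := by omega
        have e2 : ¬ (j - k = 0) := by omega
        have e3 : j - k = (j - k - 1) + 1 := by omega
        have e4 : j - (k + 1) = j - k - 1 := by omega
        rw [e4]
        simp only [e0, decide_true, Bool.true_and, e2, decide_false, Bool.and_false, e1]
        rw [e3, List.getD_cons_succ]
        simp

def bitsOf (n x : Nat) : List Int :=
  (List.range n).map (fun i => if x.testBit i then 1 else 0)

lemma enc_lt (bs : List Int) (hb : ∀ v ∈ bs, v = 0 ∨ v = 1) :
    (bs.zipIdx.foldl (fun x vi => x ||| (vi.1.toNat <<< vi.2)) 0) < 2 ^ bs.length := by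
  apply Nat.lt_pow_two_of_testBit
  intro i hi
  rw [show bs.zipIdx = bs.zipIdx 0 from rfl, enc_testBit bs hb 0 0 i]
  simp
  omega

lemma bitsOf_enc (bs : List Int) (hb : ∀ v ∈ bs, v = 0 ∨ v = 1) :
    bitsOf bs.length (bs.zipIdx.foldl (fun x vi => x ||| (vi.1.toNat <<< vi.2)) 0) = bs := by
  apply List.ext_getElem
  · simp [bitsOf]
  · intro i h1 h2
    simp only [bitsOf, List.getElem_map, List.getElem_range]
    have h1' : i < bs.length := by simpa [bitsOf] using h1
    rw [show bs.zipIdx = bs.zipIdx 0 from rfl, enc_testBit bs hb 0 0 i]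
    rcases hb bs[i] (List.getElem_mem h1') with h | h
    · simp [h1', h]
    · simp [h1', h]

lemma bitsOf_getD (n x : Nat) (i : Nat) (hi : i < n) :
    (bitsOf n x).getD i 0 = if x.testBit i then 1 else 0 := by
  rw [List.getD_eq_getElem _ 0 (by simp [bitsOf]; omega)]
  simp [bitsOf]

lemma bitsOf_step (n x : Nat) (hx : x < 2 ^ n) :
    bitsOf n (((x >>> 1) ^^^ (x <<< 1)) &&& (2 ^ n - 1)) = stepL (bitsOf n x) := by
  have hlen : (bitsOf n x).length = n := by simp [bitsOf]
  apply List.ext_getElem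
  · simp [bitsOf, stepL]
  · intro j h1 h2
    have hj : j < n := by simpa [bitsOf] using h1
    rw [stepL_getElem _ j (by omega)]
    rw [show (bitsOf n ((x >>> 1 ^^^ x <<< 1) &&& (2 ^ n - 1)))[j]'h1
        = (if (((x >>> 1 ^^^ x <<< 1) &&& (2 ^ n - 1)).testBit j : Bool) then (1 : Int) else 0) from by
      simp [bitsOf]]
    rw [hlen]
    rw [Nat.testBit_and, Nat.testBit_two_pow_sub_one, Nat.testBit_xor,
      Nat.testBit_shiftRight, Nat.testBit_shiftLeft]
    by_cases h0 : 0 < j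
    · rw [if_pos h0, bitsOf_getD n x (j - 1) (by omega)]
      by_cases h2n : j + 1 < n
      · rw [if_pos h2n, bitsOf_getD n x (j + 1) (by omega)]
        simp only [show 1 + j = j + 1 from by omega, show (j ≥ 1) = True from by simp; omega, decide_true, Bool.true_and, hj]
        by_cases ha : x.testBit (j + 1) <;> by_cases hbb : x.testBit (j - 1) <;>
          simp [ha, hbb, hj] <;> omega
      · rw [if_neg h2n]
        have hj1 : j + 1 = n := by omega
        have hfalse : x.testBit (j + 1) = false := by
          rw [hj1]; exact Nat.testBit_lt_two_pow hx
        simp only [show 1 + j = j + 1 from by omega, hfalse,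
          show (j ≥ 1) = True from by simp; omega, decide_true, Bool.true_and]
        by_cases hbb : x.testBit (j - 1) <;> simp [hbb, hj] <;> omega
    · have hj0 : j = 0 := by omega
      subst hj0
      rw [if_neg h0]
      by_cases h2n : 0 + 1 < n
      · rw [if_pos h2n, bitsOf_getD n x 1 (by omega)]
        by_cases ha : x.testBit 1 <;> simp [ha, hj, show 1 + 0 = 1 from rfl]
      · have hn1 : n = 1 := by omega
        rw [if_neg h2n]
        have hfalse : x.testBit 1 = false := by
          have : x < 2 ^ 1 := by rw [← hn1]; exact hx
          exact Nat.testBit_lt_two_pow (lt_of_lt_of_le this (by simp [Nat.pow_le_pow_right]))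
        simp [hfalse, hj, show 1 + 0 = 1 from rfl]

lemma bitsOf_bitSteps (n : Nat) : ∀ (k x : Nat), x < 2 ^ n →
    bitsOf n (pvBitSteps k (2 ^ n - 1) x) = stepL^[k] (bitsOf n x) := by
  intro k
  induction k with
  | zero => intro x _; rfl
  | succ k ih =>
      intro x hx
      rw [show pvBitSteps (k + 1) (2 ^ n - 1) x
          = pvBitSteps k (2 ^ n - 1) (((x >>> 1) ^^^ (x <<< 1)) &&& (2 ^ n - 1)) from rfl]
      have hlt : ((x >>> 1) ^^^ (x <<< 1)) &&& (2 ^ n - 1) < 2 ^ n := by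
        rw [Nat.and_two_pow_sub_one_eq_mod]
        exact Nat.mod_lt _ (by positivity)
      rw [ih _ hlt, bitsOf_step n x hx, Function.iterate_succ_apply]

lemma and_one_testBit (y i : Nat) : (((y >>> i) &&& 1 : Nat) : Int) = if y.testBit i then 1 else 0 := by
  rw [Nat.and_one_is_mod]
  rcases Nat.mod_two_eq_zero_or_one (y >>> i) with h | h <;>
    simp [Nat.testBit, h]

lemma foldl_const_iterate {α β : Type} (f : α → α) (l : List β) (a : α) :
    l.foldl (fun x _ => f x) a = f^[l.length] a := by
  induction l generalizing a with
  | nil => rfl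
  | cons b l ih => simp [List.foldl_cons, ih, Function.iterate_succ_apply]


lemma foldl_ext {α β : Type} (f g : α → β → α) (h : ∀ a b, f a b = g a b) (l : List β) (a : α) :
    l.foldl f a = l.foldl g a := by
  have : f = g := funext fun a => funext (h a)
  rw [this]

lemma stepL_length (xs : List Int) : (stepL xs).length = xs.length := by
  simp [stepL]

lemma stepL_mem01 (xs : List Int) : ∀ v ∈ stepL xs, v = 0 ∨ v = 1 := by
  intro v hv
  simp [stepL] at hv
  obtain ⟨i, _, hi⟩ := hv
  split at hi <;> omega

-- A, for days ≠ 0 on a nonempty list, iterates the synchronous day map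
lemma cellCompete_eq_iterate (states : List Int) (days : Int)
    (hd : days ≠ 0) (hn : 1 ≤ states.length) :
    cellCompete states days = stepL^[(days + 1 - 1).toNat] states := by
  unfold cellCompete
  rw [if_neg hd, if_neg (by omega)]
  rw [foldl_ext _ (fun (new : List Int) (_d : Int) => stepL new)
    (fun new d => by simpa using innerA new 0 new rfl (Nat.zero_le _))]
  rw [foldl_const_iterate, PySem.List.length_pyRange_one]

-- ===== VERDICT (by name: the statement is the Claim_ definition above) =====
theorem cellCompete_spec : Claim_equal_cellCompete := by
  intro states days _
  show cellCompete states days = cellCompete_alt states days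
  simp only [cellCompete_alt]
  by_cases h : days ≤ 0 ∨ states.length = 0
  · rw [if_pos h]
    by_cases hd : days = 0
    · unfold cellCompete; rw [if_pos hd]
    · unfold cellCompete
      rw [if_neg hd]
      by_cases hl : states.length = 0
      · rw [if_pos (by omega)]
      · rw [if_neg (by omega), PySem.List.pyRange_one_eq_nil (by omega)]
        rfl
  · push_neg at h
    obtain ⟨hd, hn⟩ := h
    rw [if_neg (by push_neg; exact ⟨hd, hn⟩)]
    have hcur : (List.range states.length).map (fun i =>
        if (if i > 0 then states.getD (i - 1) 0 else 0)
            ≠ (if i + 1 < states.length then states.getD (i + 1) 0 else 0)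
        then (1 : Int) else 0) = stepL states := by
      unfold stepL
      congr 1
      funext i
      by_cases hLR : (if 0 < i then states.getD (i - 1) 0 else 0)
          = (if i + 1 < states.length then states.getD (i + 1) 0 else 0) <;> simp [hLR]
    rw [hcur]
    rw [show (1 <<< states.length) - 1 = 2 ^ states.length - 1 from by rw [Nat.one_shiftLeft]]
    have hb01 := stepL_mem01 states
    have hxlt : ((stepL states).zipIdx.foldl (fun x vi => x ||| (vi.1.toNat <<< vi.2)) 0)
        < 2 ^ states.length := by
      have := enc_lt (stepL states) hb01
      rwa [stepL_length] at this
    have hmap : ∀ y : Nat, (List.range states.length).map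
        (fun i => (((y >>> i) &&& 1 : Nat) : Int)) = bitsOf states.length y := by
      intro y
      unfold bitsOf
      congr 1
      funext i
      exact and_one_testBit y i
    rw [hmap, bitsOf_bitSteps states.length _ _ hxlt]
    have henc : bitsOf states.length
        ((stepL states).zipIdx.foldl (fun x vi => x ||| (vi.1.toNat <<< vi.2)) 0) = stepL states := by
      have := bitsOf_enc (stepL states) hb01
      rwa [stepL_length] at this
    rw [henc, ← Function.iterate_succ_apply]
    rw [show (days - 1).toNat.succ = (days + 1 - 1).toNat from by omega]
    exact cellCompete_eq_iterate states days (by omega) (by omega)
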